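-- pv_equiv track=rewrite | github.com/goorkamateusz/8051-Assembler-Examples | tab2space.py | reindent_line
-- ===== SOURCE A (Python) =====
-- def reindent_line( line: str, space_size: int ) -> str:
--     """ Reindent line given in argumentes """
--     reindented_line = ''
--     try:
--         char_it = iter( line )
--
--         while True:
--             for i in range( 0, space_size ):
--                 char = next(char_it)    # it raise StopIteration exception
--
--                 if char != '\t':
--                     reindented_line += char
--                 else:
--                     for _ in range( 0, space_size-i ):
--                         reindented_line += ' '
--                     break
--     except StopIteration:
--         pass
--
--     return reindented_line
-- ===== SOURCE B (Python) =====
-- def reindent_line(line: str, space_size: int) -> str: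
--     """Reindent line: single pass with a running column counter (tab stops every space_size)."""
--     out = []
--     col = 0
--     for ch in line:
--         if ch == '\t':
--             pad = space_size - col % space_size
--             out.append(' ' * pad)
--             col += pad
--         else:
--             out.append(ch)
--             col += 1
--     return ''.join(out)
-- ===== Notes on version B (the rewrite author's own statement) =====
-- stated objective: idiomatic
-- what changed: Replaces A's iterator with nested per-block loop, break-to-refill and StopIteration control flow by a single for-loop over the characters with a running column counter and a modulo computation of each tab's padding.
import Mathlib
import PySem

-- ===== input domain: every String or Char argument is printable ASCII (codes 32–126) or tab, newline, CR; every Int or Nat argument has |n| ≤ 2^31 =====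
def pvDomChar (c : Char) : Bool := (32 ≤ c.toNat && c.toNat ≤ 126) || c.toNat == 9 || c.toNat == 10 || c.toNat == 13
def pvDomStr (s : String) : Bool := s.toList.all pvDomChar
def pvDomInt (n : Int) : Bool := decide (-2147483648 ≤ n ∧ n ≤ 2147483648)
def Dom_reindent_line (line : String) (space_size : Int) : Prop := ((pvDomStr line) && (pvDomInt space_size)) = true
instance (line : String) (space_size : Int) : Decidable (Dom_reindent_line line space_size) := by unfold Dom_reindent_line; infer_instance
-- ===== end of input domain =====

-- B replaces A's iterator + nested per-block loop + break/StopIteration control flow by a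
-- single pass with a running column counter and modulo padding (same cost, plainer code).

-- ===== PORT A =====
-- A's 'while True' over an iterator: the outer loop restarts the inner 'for i in range(0, space_size)'
-- block; the inner loop consumes characters.  k counts the REMAINING inner iterations (k = space_size - i),
-- so the tab branch's 'space_size - i' spaces are 'k' spaces.  When space_size ≤ 0 the Python loops forever;
-- the 'fuel' counter (= line length + 1, enough for one outer restart per consumed character when
-- space_size ≥ 1) only makes the transcription total — Pre_ excludes space_size ≤ 0.
mutual
def pvOuterA (fuel : Nat) (n : Nat) (cs : List Char) (acc : List Char) : List Char :=
  match fuel with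
  | 0 => acc
  | fuel + 1 => pvInnerA fuel n n cs acc
  termination_by (fuel, 0)

def pvInnerA (fuel : Nat) (n : Nat) (k : Nat) (cs : List Char) (acc : List Char) : List Char :=
  match k with
  | 0 => pvOuterA fuel n cs acc          -- inner 'for' finished: continue the 'while True'
  | m + 1 =>
    match cs with
    | [] => acc                          -- next(char_it) raises StopIteration: return
    | c :: rest =>
      if c ≠ '\t' then pvInnerA fuel n m rest (acc ++ [c])
      else pvOuterA fuel n rest (acc ++ List.replicate (m + 1) ' ')  -- space_size - i spaces, then break
  termination_by (fuel, k + 1)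
end

def reindent_line (line : String) (space_size : Int) : String :=
  String.mk (pvOuterA (line.toList.length + 1) space_size.toNat line.toList [])

-- ===== PORT B =====
def pvLoopB (n : Nat) (cs : List Char) (col : Nat) : List Char :=
  match cs with
  | [] => []
  | c :: rest =>
    if c = '\t' then
      let pad := n - col % n
      List.replicate pad ' ' ++ pvLoopB n rest (col + pad)
    else
      c :: pvLoopB n rest (col + 1)

def reindent_line_alt (line : String) (space_size : Int) : String :=
  String.mk (pvLoopB space_size.toNat line.toList 0)

-- ===== PRECONDITION & SPEC =====
-- A's 'while True' never terminates when space_size ≤ 0 (the inner range is empty, so no character is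
-- ever consumed and StopIteration is never raised): Pre_ admits exactly the inputs on which A returns.
def Pre_reindent_line (line : String) (space_size : Int) : Prop := 1 ≤ space_size
instance (line : String) (space_size : Int) : Decidable (Pre_reindent_line line space_size) := by unfold Pre_reindent_line; infer_instance

def pvWitness_reindent_line : String × Int := ("\tmov A, #5\t;x", 4)

def Spec_reindent_line (line : String) (space_size : Int) (out : String) : Prop := out = reindent_line_alt line space_size
instance (line : String) (space_size : Int) (out : String) : Decidable (Spec_reindent_line line space_size out) := by unfold Spec_reindent_line; infer_instance

-- ===== CLAIM (what is proved, stated in full; the proofs are below) =====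
def Claim_equal_reindent_line : Prop := ∀ (line : String) (space_size : Int), Dom_reindent_line line space_size → Pre_reindent_line line space_size → Spec_reindent_line line space_size (reindent_line line space_size)

-- ===== LEMMAS AND PROOFS =====

-- Invariant tying A's remaining-block counter k to B's column counter: k = n - col % n.
-- Both lemmas hold as soon as the fuel covers the characters left to consume.
theorem pv_inner_outer_eq (fuel : Nat) :
    (∀ (n cs acc col : _), 1 ≤ n → col % n = 0 → cs.length < fuel →
        pvOuterA fuel n cs acc = acc ++ pvLoopB n cs col) ∧
    (∀ (n k cs acc col : _), 1 ≤ n → k = n - col % n → cs.length ≤ fuel →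
        pvInnerA fuel n k cs acc = acc ++ pvLoopB n cs col) := by
  induction fuel with
  | zero =>
    constructor
    · intro n cs acc col _ _ h; omega
    · intro n k cs acc col hn hk hlen
      have hcs : cs = [] := by cases cs <;> simp_all
      subst hcs
      have hk1 : 1 ≤ k := by
        have := Nat.mod_lt col (show 0 < n by omega); omega
      obtain ⟨m, rfl⟩ : ∃ m, k = m + 1 := ⟨k - 1, by omega⟩
      simp [pvInnerA, pvLoopB]
  | succ fuel ih =>
    obtain ⟨_, ihI⟩ := ih
    have inner : ∀ (n k : ℕ) (cs acc : List Char) (col : ℕ), 1 ≤ n → k = n - col % n →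
        cs.length ≤ fuel + 1 → pvInnerA (fuel + 1) n k cs acc = acc ++ pvLoopB n cs col := by
      intro n k
      -- one step of the 'while True': unfold pvOuterA (fuel + 1) into the fuel-level inner IH
      have houter : ∀ (cs acc : List Char) (col : ℕ), 1 ≤ n → col % n = 0 → cs.length ≤ fuel →
          pvOuterA (fuel + 1) n cs acc = acc ++ pvLoopB n cs col := by
        intro cs acc col hn h0 hl
        simp only [pvOuterA]
        exact ihI n n cs acc col hn (by omega) hl
      induction k with
      | zero =>
        intro cs acc col hn hk hlen
        have := Nat.mod_lt col (show 0 < n by omega); omega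
      | succ m ihk =>
        intro cs acc col hn hk hlen
        cases cs with
        | nil => simp [pvInnerA, pvLoopB]
        | cons c rest =>
          have hmod : col % n < n := Nat.mod_lt col (by omega)
          have hrest : rest.length ≤ fuel := by simpa using hlen
          by_cases hc : c = '\t'
          · subst hc
            have hpad : n - col % n = m + 1 := by omega
            have hcol' : (col + (m + 1)) % n = 0 := by
              have he : col + (m + 1) = (col / n + 1) * n := by
                have hd := Nat.div_add_mod col n
                have hr : (col / n + 1) * n = n * (col / n) + n := by ring
                omega
              rw [he, Nat.mul_mod_left]
            have hout := houter rest (acc ++ List.replicate (m + 1) ' ') (col + (m + 1))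
                hn hcol' hrest
            simp [pvInnerA, pvLoopB, hpad, hout]
          · have htail : pvInnerA (fuel + 1) n m rest (acc ++ [c]) =
                (acc ++ [c]) ++ pvLoopB n rest (col + 1) := by
              by_cases hm : col % n = n - 1
              · have hm0 : m = 0 := by omega
                have hc0 : (col + 1) % n = 0 := by
                  have he : col + 1 = (col / n + 1) * n := by
                    have hd := Nat.div_add_mod col n
                    have hr : (col / n + 1) * n = n * (col / n) + n := by ring
                    omega
                  rw [he, Nat.mul_mod_left]
                subst hm0
                simp only [pvInnerA]
                exact houter rest (acc ++ [c]) (col + 1) hn hc0 hrest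
              · have h1 : (col + 1) % n = col % n + 1 := by
                  rw [Nat.add_mod, Nat.mod_eq_of_lt (show 1 < n by omega),
                      Nat.mod_eq_of_lt (by omega)]
                exact ihk rest (acc ++ [c]) (col + 1) hn (by omega)
                  (by omega)
            simp [pvInnerA, pvLoopB, hc, htail]
    refine ⟨?_, inner⟩
    intro n cs acc col hn hcol hlen
    simp only [pvOuterA]
    exact ihI n n cs acc col hn (by omega) (by omega)

-- ===== VERDICT (by name: the statement is the Claim_ definition above) =====
theorem reindent_line_spec : Claim_equal_reindent_line := by
  intro line space_size _ hpre
  unfold Spec_reindent_line reindent_line reindent_line_alt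
  have hn : 1 ≤ space_size.toNat := by
    unfold Pre_reindent_line at hpre; omega
  have h := (pv_inner_outer_eq (line.toList.length + 1)).1 space_size.toNat line.toList [] 0
    hn (by simp) (by omega)
  rw [h]
  simp
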